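-- pv_equiv track=rewrite | github.com/SWU-HEROS/SWU_HEROS | dataGenerator/utils/make_new_doc.py | calculate_age_distribution
-- ===== SOURCE A (Python) =====
-- def calculate_age_distribution(people_list):
--     dist = {str(age): 0 for age in [10, 20, 30, 40, 50, 60, "70+"]}
--     for p in people_list:
--         age = p["age"]
--         if age < 20:
--             dist["10"] += 1
--         elif age < 30:
--             dist["20"] += 1
--         elif age < 40:
--             dist["30"] += 1
--         elif age < 50:
--             dist["40"] += 1
--         elif age < 60:
--             dist["50"] += 1
--         elif age < 70:
--             dist["60"] += 1
--         else:
--             dist["70+"] += 1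
--
--     return dist
-- ===== SOURCE B (Python) =====
-- def calculate_age_distribution(people_list):
--     bounds = [20, 30, 40, 50, 60, 70]
--     keys = ["10", "20", "30", "40", "50", "60", "70+"]
--     dist = dict.fromkeys(keys, 0)
--     for p in people_list:
--         age = p["age"]
--         # binary search: index of first bound strictly greater than age (bisect_right)
--         lo, hi = 0, len(bounds)
--         while lo < hi:
--             mid = (lo + hi) // 2
--             if age < bounds[mid]:
--                 hi = mid
--             else:
--                 lo = mid + 1
--         dist[keys[lo]] += 1
--     return dist
-- ===== Notes on version B (the rewrite author's own statement) =====
-- stated objective: idiomatic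
-- what changed: Replaces the seven-way if-elif comparison cascade with a boundary table [20..70] plus parallel key list, picking each person's decade bucket by a hand-written bisect_right binary search over the table.
import Mathlib
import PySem

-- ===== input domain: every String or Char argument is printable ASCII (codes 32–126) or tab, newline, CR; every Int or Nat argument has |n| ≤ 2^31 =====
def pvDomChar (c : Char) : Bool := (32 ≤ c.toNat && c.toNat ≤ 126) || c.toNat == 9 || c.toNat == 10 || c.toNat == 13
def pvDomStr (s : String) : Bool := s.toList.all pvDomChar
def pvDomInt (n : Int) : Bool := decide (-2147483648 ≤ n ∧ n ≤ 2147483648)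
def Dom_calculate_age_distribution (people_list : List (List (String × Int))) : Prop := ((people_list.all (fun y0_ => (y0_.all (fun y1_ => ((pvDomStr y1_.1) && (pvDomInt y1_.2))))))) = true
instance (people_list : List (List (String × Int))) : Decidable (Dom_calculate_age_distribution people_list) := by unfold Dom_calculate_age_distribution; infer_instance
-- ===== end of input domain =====

-- B replaces A's seven-way if-elif cascade with a boundary table and a binary search (bisect_right); same one pass, no speed claim.


-- ===== PORT A =====
-- the if-elif cascade of A, branch for branch
def pvCascadeKey (age : Int) : String :=
  if age < 20 then "10"
  else if age < 30 then "20"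
  else if age < 40 then "30"
  else if age < 50 then "40"
  else if age < 60 then "50"
  else if age < 70 then "60"
  else "70+"

-- the for-loop of A; p["age"] = first match in the association list (none = KeyError, excluded by Pre_)
def pvLoopA (people : List (List (String × Int))) (dist : PySem.Dict String Int) :
    Option (PySem.Dict String Int) :=
  match people with
  | [] => some dist
  | p :: rest =>
    match List.lookup "age" p with
    | none => none
    | some age => pvLoopA rest (dist.modify (pvCascadeKey age) 0 (· + 1))

def calculate_age_distribution (people_list : List (List (String × Int))) : List (String × Int) :=
  let dist := (["10", "20", "30", "40", "50", "60", "70+"]).foldl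
      (fun d k => d.insert k (0 : Int)) PySem.Dict.empty
  match pvLoopA people_list dist with
  | some d => d.items
  | none => []   -- unreachable under Pre_ (Python raises KeyError here)

-- ===== PORT B =====
-- the hand-written while-loop binary search of Source B (bisect_right)
def pvBisect (bounds : List Int) (age : Int) (lo hi : Nat) : Nat :=
  if _h : lo < hi then
    let mid := (lo + hi) / 2
    if age < bounds.getD mid 0 then pvBisect bounds age lo mid
    else pvBisect bounds age (mid + 1) hi
  else lo
termination_by hi - lo
decreasing_by all_goals omega

def pvLoopB (bounds : List Int) (keys : List String) (people : List (List (String × Int)))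
    (dist : PySem.Dict String Int) : Option (PySem.Dict String Int) :=
  match people with
  | [] => some dist
  | p :: rest =>
    match List.lookup "age" p with
    | none => none
    | some age =>
      let k := keys.getD (pvBisect bounds age 0 bounds.length) "70+"
      pvLoopB bounds keys rest (dist.modify k 0 (· + 1))

def calculate_age_distribution_alt (people_list : List (List (String × Int))) : List (String × Int) :=
  let bounds : List Int := [20, 30, 40, 50, 60, 70]
  let keys : List String := ["10", "20", "30", "40", "50", "60", "70+"]
  let dist := keys.foldl (fun d k => d.insert k (0 : Int)) PySem.Dict.empty
  match pvLoopB bounds keys people_list dist with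
  | some d => d.items
  | none => []   -- unreachable under Pre_

-- ===== PRECONDITION & SPEC =====
-- Pre_ excludes exactly the people dicts with no "age" key, on which A raises KeyError.
def Pre_calculate_age_distribution (people_list : List (List (String × Int))) : Prop :=
  ∀ p ∈ people_list, (List.lookup "age" p).isSome = true
instance (people_list : List (List (String × Int))) : Decidable (Pre_calculate_age_distribution people_list) := by unfold Pre_calculate_age_distribution; infer_instance

def pvWitness_calculate_age_distribution : (List (List (String × Int))) :=
  [[("age", 25)], [("age", 71), ("name", 3)], [("age", 19)]]

def Spec_calculate_age_distribution (people_list : List (List (String × Int))) (out : List (String × Int)) : Prop := out = calculate_age_distribution_alt people_list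
instance (people_list : List (List (String × Int))) (out : List (String × Int)) : Decidable (Spec_calculate_age_distribution people_list out) := by unfold Spec_calculate_age_distribution; infer_instance

-- ===== CLAIM (what is proved, stated in full; the proofs are below) =====
def Claim_equal_calculate_age_distribution : Prop := ∀ (people_list : List (List (String × Int))), Dom_calculate_age_distribution people_list → Pre_calculate_age_distribution people_list → Spec_calculate_age_distribution people_list (calculate_age_distribution people_list)

-- ===== LEMMAS AND PROOFS =====

-- the cascade and the binary search pick the same bucket key
lemma pvKey_eq (age : Int) :
    pvCascadeKey age
      = ([ "10", "20", "30", "40", "50", "60", "70+"] : List String).getD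
          (pvBisect [20, 30, 40, 50, 60, 70] age 0 6) "70+" := by
  unfold pvCascadeKey
  split_ifs with h1 h2 h3 h4 h5 h6
  · rw [show pvBisect [20, 30, 40, 50, 60, 70] age 0 6 = 0 by
      simp [pvBisect, show age < 50 by omega, show age < 30 by omega, h1]]
    rfl
  · rw [show pvBisect [20, 30, 40, 50, 60, 70] age 0 6 = 1 by
      simp [pvBisect, show age < 50 by omega, h1, h2]]
    rfl
  · rw [show pvBisect [20, 30, 40, 50, 60, 70] age 0 6 = 2 by
      simp [pvBisect, show age < 50 by omega, show ¬ age < 30 from h2, h3]]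
    rfl
  · rw [show pvBisect [20, 30, 40, 50, 60, 70] age 0 6 = 3 by
      simp [pvBisect, show age < 50 from h4, show ¬ age < 30 from h2, h3]]
    rfl
  · rw [show pvBisect [20, 30, 40, 50, 60, 70] age 0 6 = 4 by
      simp [pvBisect, h4, show age < 70 by omega, h5]]
    rfl
  · rw [show pvBisect [20, 30, 40, 50, 60, 70] age 0 6 = 5 by
      simp [pvBisect, h4, show age < 70 from h6, h5]]
    rfl
  · rw [show pvBisect [20, 30, 40, 50, 60, 70] age 0 6 = 6 by
      simp [pvBisect, h4, h6]]
    rfl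

lemma pvLoop_eq (people : List (List (String × Int))) (dist : PySem.Dict String Int) :
    pvLoopA people dist
      = pvLoopB [20, 30, 40, 50, 60, 70] ["10", "20", "30", "40", "50", "60", "70+"] people dist := by
  induction people generalizing dist with
  | nil => rfl
  | cons p rest ih =>
    simp only [pvLoopA, pvLoopB]
    cases List.lookup "age" p with
    | none => rfl
    | some age =>
      simp only [List.length_cons, List.length_nil]
      rw [← pvKey_eq, ih]

-- ===== VERDICT (by name: the statement is the Claim_ definition above) =====
theorem calculate_age_distribution_spec : Claim_equal_calculate_age_distribution := by
  intro people_list _ _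
  show _ = _
  simp only [calculate_age_distribution, calculate_age_distribution_alt]
  rw [pvLoop_eq]
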